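-- pv_equiv track=rewrite | github.com/allmeat/connect6 | referee.py | diagonal_connection_check
-- ===== SOURCE A (Python) =====
-- from typing import List, DefaultDict
--
-- def diagonal_connection_check(current_position: List[int], all_position: List[List[int]]) -> int:
--     # recursive
--     def count_lower_right(cnt: int, current: List[int]) -> int:
--         next_position = [p + 1 for p in current]
--         if next_position in all_position:
--             cnt = count_lower_right(cnt + 1, next_position)
--             return cnt
--         else:
--             return cnt
--     return count_lower_right(0, current_position)
-- ===== SOURCE B (Python) =====
-- def diagonal_connection_check(current_position, all_position):
--     # Collect the diagonal offsets d >= 1 such that current_position shifted by d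
--     # appears in all_position, in one pass; then count consecutive offsets 1,2,...
--     offsets = set()
--     for pos in all_position:
--         if len(pos) == len(current_position) and len(pos) > 0:
--             d = pos[0] - current_position[0]
--             if d >= 1 and all(q - p == d for p, q in zip(current_position, pos)):
--                 offsets.add(d)
--     cnt = 0
--     while cnt + 1 in offsets:
--         cnt += 1
--     return cnt
-- ===== Notes on version B (the rewrite author's own statement) =====
-- stated objective: alternative
-- what changed: Instead of A's recursion that repeatedly builds the shifted position and re-scans the list for it, B makes one pass over all_position extracting each position's diagonal offset from current_position into a set, then counts how many consecutive offsets 1,2,3,... are present.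
import Mathlib
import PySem

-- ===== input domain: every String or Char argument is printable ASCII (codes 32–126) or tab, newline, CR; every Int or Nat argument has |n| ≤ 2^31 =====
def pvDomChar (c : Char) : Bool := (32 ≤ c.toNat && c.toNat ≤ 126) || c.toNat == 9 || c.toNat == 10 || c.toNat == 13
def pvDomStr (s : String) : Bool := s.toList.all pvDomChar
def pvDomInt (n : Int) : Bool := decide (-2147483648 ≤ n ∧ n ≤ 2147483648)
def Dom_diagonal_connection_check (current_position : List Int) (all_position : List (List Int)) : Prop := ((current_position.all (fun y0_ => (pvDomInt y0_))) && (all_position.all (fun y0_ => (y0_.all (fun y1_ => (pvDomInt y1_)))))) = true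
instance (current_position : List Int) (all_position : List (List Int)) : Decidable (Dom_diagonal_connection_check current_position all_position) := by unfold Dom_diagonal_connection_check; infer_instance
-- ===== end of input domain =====

-- B replaces A's recursion (shift the position, re-scan the list, recurse) with a different
-- algorithm: one pass over all_position collecting the diagonal offsets into a set, then a
-- count of consecutive offsets 1,2,3,…; equivalence is about the return value (objective: alternative).

-- ===== PORT A =====
-- A's inner recursion `count_lower_right(cnt, current)`; fuel all_position.length + 1 is
-- enough on every input satisfying Pre_ (each successful step's position is a distinct
-- member of all_position), so on Pre_ this computes exactly what the Python recursion does.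
def pvA_rec (all_position : List (List Int)) : Nat → Int → List Int → Int
  | 0, cnt, _ => cnt
  | f + 1, cnt, current =>
    let next_position := current.map (fun p => p + 1)
    if next_position ∈ all_position then pvA_rec all_position f (cnt + 1) next_position
    else cnt

def diagonal_connection_check (current_position : List Int) (all_position : List (List Int)) : Int :=
  pvA_rec all_position (all_position.length + 1) 0 current_position

-- ===== PORT B =====
-- Source B's loop body: `if len(pos)==len(current) and len(pos)>0: d = pos[0]-current[0]; if d>=1 and all(...): offsets.add(d)`
-- (the match on the two heads is the `len(pos)>0` guard together with the indexings pos[0], current_position[0])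
def pvStep (current_position : List Int) (offsets : PySem.Set Int) (pos : List Int) : PySem.Set Int :=
  match pos, current_position with
  | q :: _, p :: _ =>
    if pos.length = current_position.length then
      if 1 ≤ q - p ∧ ((current_position.zip pos).all (fun pr => pr.2 - pr.1 == q - p)) then
        PySem.Set.add offsets (q - p)
      else offsets
    else offsets
  | _, _ => offsets

-- Source B's first pass: `offsets = set(); for pos in all_position: …`
def pvOffsets (current_position : List Int) (all_position : List (List Int)) : PySem.Set Int :=
  all_position.foldl (pvStep current_position) PySem.Set.empty

-- Source B's `while cnt + 1 in offsets: cnt += 1`; the offsets in the set are distinct integers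
-- ≥ 1, so the loop makes at most `offsets.length` steps and that fuel is exact.
def pvB_while (offsets : PySem.Set Int) : Nat → Int → Int
  | 0, cnt => cnt
  | n + 1, cnt => if (cnt + 1) ∈ offsets then pvB_while offsets n (cnt + 1) else cnt

def diagonal_connection_check_alt (current_position : List Int) (all_position : List (List Int)) : Int :=
  let offsets := pvOffsets current_position all_position
  pvB_while offsets offsets.length 0

-- ===== PRECONDITION & SPEC =====
-- Pre_ excludes exactly current_position = [] with [] ∈ all_position, where the Python A
-- recurses forever on [] and raises RecursionError (B returns a value there instead).
def Pre_diagonal_connection_check (current_position : List Int) (all_position : List (List Int)) : Prop :=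
  current_position ≠ [] ∨ ([] : List Int) ∉ all_position
instance (current_position : List Int) (all_position : List (List Int)) : Decidable (Pre_diagonal_connection_check current_position all_position) := by unfold Pre_diagonal_connection_check; infer_instance

def pvWitness_diagonal_connection_check : List Int × List (List Int) := ([1, 2], [[2, 3], [3, 4]])

def Spec_diagonal_connection_check (current_position : List Int) (all_position : List (List Int)) (out : Int) : Prop := out = diagonal_connection_check_alt current_position all_position
instance (current_position : List Int) (all_position : List (List Int)) (out : Int) : Decidable (Spec_diagonal_connection_check current_position all_position out) := by unfold Spec_diagonal_connection_check; infer_instance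

-- ===== CLAIM (what is proved, stated in full; the proofs are below) =====
def Claim_equal_diagonal_connection_check : Prop := ∀ (current_position : List Int) (all_position : List (List Int)), Dom_diagonal_connection_check current_position all_position → Pre_diagonal_connection_check current_position all_position → Spec_diagonal_connection_check current_position all_position (diagonal_connection_check current_position all_position)

-- ===== LEMMAS AND PROOFS =====

lemma pv_map_map (cur : List Int) (k : Int) :
    (cur.map (fun p => p + k)).map (fun p => p + 1) = cur.map (fun p => p + (k + 1)) := by
  rw [List.map_map]
  exact List.map_congr_left (fun a _ => by simp [Function.comp]; ring)

-- the shifted copies of a nonempty list are pairwise distinct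
lemma pv_shift_inj (x : Int) (cur : List Int) :
    Function.Injective (fun j : Nat => (x :: cur).map (fun p => p + ((j : Int) + 1))) := by
  intro a b h
  have h0 := congrArg List.head? h
  simp only [List.map_cons, List.head?_cons, Option.some.injEq] at h0
  omega

-- N distinct values all occurring in a list force N ≤ its length
lemma pv_nodup_bound {α : Type} [DecidableEq α] (f : Nat → α) (hf : Function.Injective f)
    (l : List α) (N : Nat) (h : ∀ j < N, f j ∈ l) : N ≤ l.length := by
  have hnodup : ((List.range N).map f).Nodup := List.nodup_range.map hf
  have h2 : ((List.range N).map f).toFinset ⊆ l.toFinset := by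
    intro y hy
    rcases List.mem_map.mp (List.mem_toFinset.mp hy) with ⟨j, hj, rfl⟩
    exact List.mem_toFinset.mpr (h j (List.mem_range.mp hj))
  have h1 : ((List.range N).map f).toFinset.card = N := by
    rw [List.toFinset_card_of_nodup hnodup]; simp
  have := Finset.card_le_card h2
  have := l.toFinset_card_le
  omega

-- the membership guard of pvStep characterised: the zip test says pos is the d-shift of a
lemma pv_eqmap (a : List Int) : ∀ (b : List Int) (d : Int),
    (b.length = a.length ∧ ((a.zip b).all (fun pr => pr.2 - pr.1 == d)) = true) ↔
      b = a.map (fun p => p + d) := by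
  induction a with
  | nil => intro b d; cases b <;> simp
  | cons p a ih =>
    intro b d
    cases b with
    | nil => simp
    | cons q b =>
      simp only [List.zip_cons_cons, List.all_cons, Bool.and_eq_true, beq_iff_eq,
        List.map_cons, List.cons.injEq, List.length_cons, Nat.add_right_cancel_iff]
      rw [← ih b d]
      constructor
      · rintro ⟨h1, h2, h3⟩; exact ⟨by omega, h1, h3⟩
      · rintro ⟨h1, h2, h3⟩; exact ⟨h2, by omega, h3⟩

lemma pv_mem_step (x : Int) (rest : List Int) (s : PySem.Set Int) (pos : List Int) (d : Int) :
    d ∈ pvStep (x :: rest) s pos ↔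
      d ∈ s ∨ (1 ≤ d ∧ pos = (x :: rest).map (fun p => p + d)) := by
  cases pos with
  | nil => simp [pvStep]
  | cons q qs =>
    show d ∈ (if (q :: qs).length = (x :: rest).length then
        if 1 ≤ q - x ∧ (((x :: rest).zip (q :: qs)).all (fun pr => pr.2 - pr.1 == q - x)) then
          PySem.Set.add s (q - x) else s else s) ↔ _
    by_cases hd : (q :: qs : List Int) = (x :: rest).map (fun p => p + d)
    · have hq : d = q - x := by
        have h0 := congrArg List.head? hd
        simp only [List.map_cons, List.head?_cons, Option.some.injEq] at h0
        omega
      obtain ⟨hlen, hzip⟩ := (pv_eqmap (x :: rest) (q :: qs) (q - x)).mpr (hq ▸ hd)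
      by_cases h1 : 1 ≤ q - x
      · rw [if_pos hlen, if_pos ⟨h1, hzip⟩, PySem.Set.mem_add]
        subst hq
        simp [hd, h1]
      · rw [if_pos hlen, if_neg (fun hc => h1 hc.1)]
        subst hq
        simp [h1]
    · split_ifs with hlen hcond
      · have hmap : (q :: qs : List Int) = (x :: rest).map (fun p => p + (q - x)) :=
          (pv_eqmap _ _ _).mp ⟨hlen, hcond.2⟩
        rw [PySem.Set.mem_add]
        constructor
        · rintro (h | rfl)
          · exact Or.inl h
          · exact absurd hmap hd
        · rintro (h | ⟨_, h⟩)
          · exact Or.inl h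
          · exact absurd h hd
      · exact ⟨fun h => Or.inl h, fun h => by
          rcases h with h | ⟨_, h⟩
          · exact h
          · exact absurd h hd⟩
      · exact ⟨fun h => Or.inl h, fun h => by
          rcases h with h | ⟨_, h⟩
          · exact h
          · exact absurd h hd⟩

lemma pv_mem_fold (x : Int) (rest : List Int) :
    ∀ (all : List (List Int)) (s : PySem.Set Int) (d : Int),
      d ∈ all.foldl (pvStep (x :: rest)) s ↔
        d ∈ s ∨ (1 ≤ d ∧ (x :: rest).map (fun p => p + d) ∈ all) := by
  intro all
  induction all with
  | nil => intro s d; simp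
  | cons pos all ih =>
    intro s d
    rw [List.foldl_cons, ih, pv_mem_step]
    constructor
    · rintro ((h | ⟨h1, rfl⟩) | ⟨h1, h2⟩)
      · exact Or.inl h
      · exact Or.inr ⟨h1, List.mem_cons_self ..⟩
      · exact Or.inr ⟨h1, List.mem_cons_of_mem _ h2⟩
    · rintro (h | ⟨h1, h2⟩)
      · exact Or.inl (Or.inl h)
      · rcases List.mem_cons.mp h2 with h | h
        · exact Or.inl (Or.inr ⟨h1, h.symm⟩)
        · exact Or.inr ⟨h1, h⟩

lemma pv_mem_offsets (x : Int) (rest : List Int) (all : List (List Int)) (d : Int) :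
    d ∈ pvOffsets (x :: rest) all ↔ 1 ≤ d ∧ (x :: rest).map (fun p => p + d) ∈ all := by
  unfold pvOffsets
  rw [pv_mem_fold]
  simp [PySem.Set.empty]

lemma pv_offsets_nil : ∀ (all : List (List Int)), pvOffsets [] all = [] := by
  intro all
  induction all with
  | nil => rfl
  | cons pos all ih =>
    show List.foldl (pvStep []) (pvStep [] PySem.Set.empty pos) all = []
    have hstep : pvStep [] PySem.Set.empty pos = PySem.Set.empty := by
      cases pos <;> rfl
    rw [hstep]; exact ih

-- A's recursion computes the least failing step count
lemma pvA_least (cur : List Int) (all : List (List Int)) :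
    ∀ (m f k : Nat), m ≤ f →
      (∀ j : Nat, k ≤ j → j < k + m → cur.map (fun p => p + ((j : Int) + 1)) ∈ all) →
      cur.map (fun p => p + (((k + m : Nat) : Int) + 1)) ∉ all →
      pvA_rec all (f + 1) (k : Int) (cur.map (fun p => p + (k : Int))) = ((k + m : Nat) : Int) := by
  intro m
  induction m with
  | zero =>
    intro f k _ _ hstop
    show (if (cur.map (fun p => p + (k : Int))).map (fun p => p + 1) ∈ all then _ else ((k : Int))) = _
    rw [pv_map_map]
    have : cur.map (fun p => p + ((k : Int) + 1)) ∉ all := by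
      simpa using hstop
    rw [if_neg this]
    simp
  | succ m ih =>
    intro f k hmf hmem hstop
    obtain ⟨f', rfl⟩ : ∃ f', f = f' + 1 := ⟨f - 1, by omega⟩
    show (if (cur.map (fun p => p + (k : Int))).map (fun p => p + 1) ∈ all then
        pvA_rec all (f' + 1) ((k : Int) + 1) ((cur.map (fun p => p + (k : Int))).map (fun p => p + 1))
      else ((k : Int))) = _
    rw [pv_map_map]
    have hk : cur.map (fun p => p + ((k : Int) + 1)) ∈ all := hmem k le_rfl (by omega)
    rw [if_pos hk]
    have e : (k + 1) + m = k + (m + 1) := by omega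
    have h := ih f' (k + 1) (by omega)
      (fun j h1 h2 => hmem j (by omega) (by omega))
      (by rw [e]; exact hstop)
    push_cast at h ⊢
    rw [h]
    omega

-- B's while loop computes the least failing step count, for any sufficient fuel
lemma pvB_least (offsets : PySem.Set Int) :
    ∀ (m F k : Nat), m ≤ F →
      (∀ j : Nat, k ≤ j → j < k + m → ((j : Int) + 1) ∈ offsets) →
      (((k + m : Nat) : Int) + 1) ∉ offsets →
      pvB_while offsets F (k : Int) = ((k + m : Nat) : Int) := by
  intro m
  induction m with
  | zero =>
    intro F k _ _ hstop
    cases F with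
    | zero => simp [pvB_while]
    | succ F =>
      show (if ((k : Int) + 1) ∈ offsets then _ else ((k : Int))) = _
      rw [if_neg (by simpa using hstop)]
      simp
  | succ m ih =>
    intro F k hmF hmem hstop
    obtain ⟨F', rfl⟩ : ∃ F', F = F' + 1 := ⟨F - 1, by omega⟩
    show (if ((k : Int) + 1) ∈ offsets then pvB_while offsets F' ((k : Int) + 1) else ((k : Int))) = _
    rw [if_pos (hmem k le_rfl (by omega))]
    have e : (k + 1) + m = k + (m + 1) := by omega
    have h := ih F' (k + 1) (by omega)
      (fun j h1 h2 => hmem j (by omega) (by omega))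
      (by rw [e]; exact hstop)
    push_cast at h ⊢
    rw [h]
    omega

-- ===== VERDICT (by name: the statement is the Claim_ definition above) =====
theorem diagonal_connection_check_spec : Claim_equal_diagonal_connection_check := by
  intro cur all _ hpre
  unfold Spec_diagonal_connection_check diagonal_connection_check diagonal_connection_check_alt
  match cur with
  | [] =>
    have hnot : ([] : List Int) ∉ all := by
      rcases hpre with h | h
      · exact absurd rfl h
      · exact h
    rw [pv_offsets_nil]
    show pvA_rec all (all.length + 1) 0 [] = pvB_while [] 0 0
    show (if ([] : List Int).map (fun p => p + 1) ∈ all then _ else (0 : Int)) = _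
    rw [List.map_nil, if_neg hnot]
    rfl
  | x :: rest =>
    have hex : ∃ j : Nat, ¬ ((x :: rest).map (fun p => p + ((j : Int) + 1)) ∈ all) := by
      by_contra h
      push_neg at h
      have := pv_nodup_bound (fun j : Nat => (x :: rest).map (fun p => p + ((j : Int) + 1)))
        (pv_shift_inj x rest) all (all.length + 1) (fun j _ => h j)
      omega
    set N := Nat.find hex with hNdef
    have hstop : (x :: rest).map (fun p => p + ((N : Int) + 1)) ∉ all := Nat.find_spec hex
    have hmem : ∀ j < N, (x :: rest).map (fun p => p + ((j : Int) + 1)) ∈ all :=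
      fun j hj => not_not.mp (Nat.find_min hex hj)
    have hNall : N ≤ all.length := by
      by_contra h
      have := pv_nodup_bound (fun j : Nat => (x :: rest).map (fun p => p + ((j : Int) + 1)))
        (pv_shift_inj x rest) all (all.length + 1) (fun j hj => hmem j (by omega))
      omega
    have hNoff : N ≤ (pvOffsets (x :: rest) all).length := by
      apply pv_nodup_bound (fun j : Nat => ((j : Int) + 1)) (fun a b h => by simpa using h)
      intro j hj
      rw [pv_mem_offsets]
      exact ⟨by omega, hmem j hj⟩
    have hA := pvA_least (x :: rest) all N all.length 0 hNall
      (fun j _ hj => hmem j (by omega))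
      (by simpa using hstop)
    have hB := pvB_least (pvOffsets (x :: rest) all) N (pvOffsets (x :: rest) all).length 0 hNoff
      (fun j _ hj => by
        rw [pv_mem_offsets]
        exact ⟨by omega, hmem j (by omega)⟩)
      (by
        rw [pv_mem_offsets]
        rintro ⟨_, h⟩
        exact hstop (by simpa using h))
    simp only [Nat.cast_zero] at hA hB
    have hmap0 : (x :: rest).map (fun p => p + (0 : Int)) = x :: rest := by simp
    rw [hmap0] at hA
    show pvA_rec all (all.length + 1) 0 (x :: rest) =
      pvB_while (pvOffsets (x :: rest) all) (pvOffsets (x :: rest) all).length 0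
    rw [hA, hB]
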